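-- pv_equiv track=rewrite | github.com/sfu-arch/TensorBricks | TB-scheduler/dnn_schedules/schedule.py | get_global_cycles_three_layer
-- ===== SOURCE A (Python) =====
-- def get_global_cycles_three_layer(batch_cycles_1, batch_cycles_2, batch_cycles_3, end_time_idx):
--     total_cycles = 0
--     cumm_b1=0
--     cumm_b2=0
--     cumm_b3 = 0
--     for time in range(end_time_idx + 1):
--         b1 = 0
--         b2 = 0
--         b3 = 0
--
--         if time in batch_cycles_1:
--             b1 = batch_cycles_1[time]
--
--         if time in batch_cycles_2:
--             b2 = batch_cycles_2[time]
--
--         if time in batch_cycles_3: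
--             b3 = batch_cycles_3[time]
--
--         total_cycles += max(b1, b2, b3)
--         cumm_b1 += b1
--         cumm_b2 += b2
--         cumm_b3 += b3
--
--     return total_cycles, cumm_b1, cumm_b2, cumm_b3
-- ===== SOURCE B (Python) =====
-- def get_global_cycles_three_layer(batch_cycles_1, batch_cycles_2, batch_cycles_3, end_time_idx):
--     cumm_b1 = sum(v for k, v in batch_cycles_1.items() if 0 <= k <= end_time_idx)
--     cumm_b2 = sum(v for k, v in batch_cycles_2.items() if 0 <= k <= end_time_idx)
--     cumm_b3 = sum(v for k, v in batch_cycles_3.items() if 0 <= k <= end_time_idx)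
--     active = set()
--     for d in (batch_cycles_1, batch_cycles_2, batch_cycles_3):
--         active.update(k for k in d if 0 <= k <= end_time_idx)
--     total_cycles = sum(
--         max(batch_cycles_1.get(k, 0), batch_cycles_2.get(k, 0), batch_cycles_3.get(k, 0))
--         for k in active)
--     return total_cycles, cumm_b1, cumm_b2, cumm_b3
-- ===== Notes on version B (the rewrite author's own statement) =====
-- stated objective: alternative
-- what changed: A runs one fused loop over every time step 0..end_time_idx maintaining four accumulators; B never iterates the time range: it reduces each dict independently for its cumulative sum and sums the per-time max over the set of keys actually present within the window.
import Mathlib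
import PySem

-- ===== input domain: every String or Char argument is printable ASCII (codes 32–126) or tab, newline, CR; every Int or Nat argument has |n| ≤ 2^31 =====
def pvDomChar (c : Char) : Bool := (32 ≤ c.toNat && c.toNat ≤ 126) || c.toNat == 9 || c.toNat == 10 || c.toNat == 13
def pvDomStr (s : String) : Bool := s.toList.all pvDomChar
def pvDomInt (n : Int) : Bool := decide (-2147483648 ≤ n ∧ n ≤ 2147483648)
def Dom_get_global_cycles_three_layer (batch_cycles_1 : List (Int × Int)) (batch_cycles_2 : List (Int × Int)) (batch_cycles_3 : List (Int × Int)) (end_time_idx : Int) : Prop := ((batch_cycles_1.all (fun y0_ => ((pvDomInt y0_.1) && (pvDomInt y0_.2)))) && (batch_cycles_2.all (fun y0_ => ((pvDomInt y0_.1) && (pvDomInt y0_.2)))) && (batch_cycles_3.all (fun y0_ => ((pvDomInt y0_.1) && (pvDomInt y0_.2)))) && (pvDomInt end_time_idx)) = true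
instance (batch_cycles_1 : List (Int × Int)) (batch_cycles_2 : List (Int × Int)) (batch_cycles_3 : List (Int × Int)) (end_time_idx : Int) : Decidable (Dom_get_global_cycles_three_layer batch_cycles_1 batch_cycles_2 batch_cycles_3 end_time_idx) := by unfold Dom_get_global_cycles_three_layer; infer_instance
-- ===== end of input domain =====

-- B replaces A's single fused loop over the whole time range 0..end_time_idx with independent
-- reductions over each dict and a sum of the per-time max over the set of keys actually present
-- (an alternative decomposition whose work depends on the dict sizes, not on end_time_idx).


-- ===== PORT A =====
def get_global_cycles_three_layer (batch_cycles_1 : List (Int × Int)) (batch_cycles_2 : List (Int × Int)) (batch_cycles_3 : List (Int × Int)) (end_time_idx : Int) : List Int :=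
  let r := (PySem.List.pyRange 0 (end_time_idx + 1) 1).foldl
    (fun (s : Int × Int × Int × Int) time =>
      let b1 : Int := match (PySem.Dict.mk batch_cycles_1).get? time with | some v => v | none => 0
      let b2 : Int := match (PySem.Dict.mk batch_cycles_2).get? time with | some v => v | none => 0
      let b3 : Int := match (PySem.Dict.mk batch_cycles_3).get? time with | some v => v | none => 0
      (s.1 + max (max b1 b2) b3, s.2.1 + b1, s.2.2.1 + b2, s.2.2.2 + b3))
    (0, 0, 0, 0)
  [r.1, r.2.1, r.2.2.1, r.2.2.2]

-- ===== PORT B =====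
-- 0 <= k <= end_time_idx
def pvWindow (end_time_idx k : Int) : Bool := decide (0 ≤ k ∧ k ≤ end_time_idx)
-- sum(v for k, v in d.items() if 0 <= k <= end_time_idx)
def pvCumm (end_time_idx : Int) (d : List (Int × Int)) : Int :=
  ((d.filter (fun p => pvWindow end_time_idx p.1)).map Prod.snd).sum
-- d.get(k, 0)
def pvGet0 (d : List (Int × Int)) (k : Int) : Int := (PySem.Dict.mk d).getD k 0

def get_global_cycles_three_layer_alt (batch_cycles_1 : List (Int × Int)) (batch_cycles_2 : List (Int × Int)) (batch_cycles_3 : List (Int × Int)) (end_time_idx : Int) : List Int :=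
  let cumm_b1 := pvCumm end_time_idx batch_cycles_1
  let cumm_b2 := pvCumm end_time_idx batch_cycles_2
  let cumm_b3 := pvCumm end_time_idx batch_cycles_3
  let active : PySem.Set Int :=
    PySem.Set.update
      (PySem.Set.update
        (PySem.Set.update PySem.Set.empty ((batch_cycles_1.map Prod.fst).filter (pvWindow end_time_idx)))
        ((batch_cycles_2.map Prod.fst).filter (pvWindow end_time_idx)))
      ((batch_cycles_3.map Prod.fst).filter (pvWindow end_time_idx))
  let total_cycles :=
    (active.map (fun k => max (max (pvGet0 batch_cycles_1 k) (pvGet0 batch_cycles_2 k)) (pvGet0 batch_cycles_3 k))).sum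
  [total_cycles, cumm_b1, cumm_b2, cumm_b3]

-- ===== PRECONDITION & SPEC =====
-- Pre_ is the dict representation invariant: each association list has pairwise-distinct keys
-- (a Python dict cannot hold duplicate keys, so no actual Python input is excluded).
def Pre_get_global_cycles_three_layer (batch_cycles_1 : List (Int × Int)) (batch_cycles_2 : List (Int × Int)) (batch_cycles_3 : List (Int × Int)) (end_time_idx : Int) : Prop :=
  (batch_cycles_1.map Prod.fst).Nodup ∧ (batch_cycles_2.map Prod.fst).Nodup ∧ (batch_cycles_3.map Prod.fst).Nodup
instance (batch_cycles_1 : List (Int × Int)) (batch_cycles_2 : List (Int × Int)) (batch_cycles_3 : List (Int × Int)) (end_time_idx : Int) : Decidable (Pre_get_global_cycles_three_layer batch_cycles_1 batch_cycles_2 batch_cycles_3 end_time_idx) := by unfold Pre_get_global_cycles_three_layer; infer_instance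

def pvWitness_get_global_cycles_three_layer : (List (Int × Int)) × (List (Int × Int)) × (List (Int × Int)) × Int :=
  ([(0, 3), (2, -1)], [(1, 4)], [], 2)

def Spec_get_global_cycles_three_layer (batch_cycles_1 : List (Int × Int)) (batch_cycles_2 : List (Int × Int)) (batch_cycles_3 : List (Int × Int)) (end_time_idx : Int) (out : List Int) : Prop := out = get_global_cycles_three_layer_alt batch_cycles_1 batch_cycles_2 batch_cycles_3 end_time_idx
instance (batch_cycles_1 : List (Int × Int)) (batch_cycles_2 : List (Int × Int)) (batch_cycles_3 : List (Int × Int)) (end_time_idx : Int) (out : List Int) : Decidable (Spec_get_global_cycles_three_layer batch_cycles_1 batch_cycles_2 batch_cycles_3 end_time_idx out) := by unfold Spec_get_global_cycles_three_layer; infer_instance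

-- ===== CLAIM (what is proved, stated in full; the proofs are below) =====
def Claim_equal_get_global_cycles_three_layer : Prop := ∀ (batch_cycles_1 : List (Int × Int)) (batch_cycles_2 : List (Int × Int)) (batch_cycles_3 : List (Int × Int)) (end_time_idx : Int), Dom_get_global_cycles_three_layer batch_cycles_1 batch_cycles_2 batch_cycles_3 end_time_idx → Pre_get_global_cycles_three_layer batch_cycles_1 batch_cycles_2 batch_cycles_3 end_time_idx → Spec_get_global_cycles_three_layer batch_cycles_1 batch_cycles_2 batch_cycles_3 end_time_idx (get_global_cycles_three_layer batch_cycles_1 batch_cycles_2 batch_cycles_3 end_time_idx)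

-- ===== LEMMAS AND PROOFS =====

-- per-time value of the max of the three lookups
def pvM3 (d1 d2 d3 : List (Int × Int)) (t : Int) : Int :=
  max (max (pvGet0 d1 t) (pvGet0 d2 t)) (pvGet0 d3 t)

lemma pvMatch_eq (d : List (Int × Int)) (t : Int) :
    (match (PySem.Dict.mk d).get? t with | some v => v | none => 0) = pvGet0 d t := by
  cases h : (PySem.Dict.mk d).get? t <;>
    simp [pvGet0, PySem.Dict.getD_eq_get?_getD, h]

-- characterization of A's fold
lemma pvFoldA (d1 d2 d3 : List (Int × Int)) (L : List Int) (s0 : Int × Int × Int × Int) :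
    L.foldl
      (fun (s : Int × Int × Int × Int) time =>
        let b1 : Int := match (PySem.Dict.mk d1).get? time with | some v => v | none => 0
        let b2 : Int := match (PySem.Dict.mk d2).get? time with | some v => v | none => 0
        let b3 : Int := match (PySem.Dict.mk d3).get? time with | some v => v | none => 0
        (s.1 + max (max b1 b2) b3, s.2.1 + b1, s.2.2.1 + b2, s.2.2.2 + b3))
      s0
    = (s0.1 + (L.map (pvM3 d1 d2 d3)).sum, s0.2.1 + (L.map (pvGet0 d1)).sum,
       s0.2.2.1 + (L.map (pvGet0 d2)).sum, s0.2.2.2 + (L.map (pvGet0 d3)).sum) := by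
  induction L generalizing s0 with
  | nil => simp
  | cons t L ih =>
    rw [List.foldl_cons, ih]
    simp only [List.map_cons, List.sum_cons, pvMatch_eq, pvM3]
    ring_nf

-- a sum of a point indicator over a Nodup list
lemma pvSumIndicator (R : List Int) (hR : R.Nodup) (k v : Int) :
    (R.map (fun t => if t = k then v else 0)).sum = if k ∈ R then v else 0 := by
  induction R with
  | nil => simp
  | cons x R ih =>
    simp only [List.nodup_cons] at hR
    simp only [List.map_cons, List.sum_cons, ih hR.2, List.mem_cons]
    by_cases hx : x = k
    · subst hx
      simp [hR.1]
    · simp [hx, Ne.symm hx]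

lemma pvGet0_nil (t : Int) : pvGet0 [] t = 0 := rfl

lemma pvGet0_cons' (k v t : Int) (d : List (Int × Int)) :
    pvGet0 ((k, v) :: d) t = if t = k then v else pvGet0 d t := by
  simp only [pvGet0, PySem.Dict.getD_eq_get?_getD, PySem.Dict.get?_mk_cons]
  by_cases h : t = k
  · simp [h]
  · simp [h, Ne.symm h]

lemma pvGet0_eq_zero_of_not_mem (d : List (Int × Int)) (t : Int) (h : t ∉ d.map Prod.fst) :
    pvGet0 d t = 0 := by
  induction d with
  | nil => exact pvGet0_nil t
  | cons p d ih =>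
    obtain ⟨k, v⟩ := p
    simp only [List.map_cons, List.mem_cons, not_or] at h
    rw [pvGet0_cons', if_neg h.1]
    exact ih h.2

lemma pvGet0_cons (k v t : Int) (d : List (Int × Int)) (hk : k ∉ d.map Prod.fst) :
    pvGet0 ((k, v) :: d) t = (if t = k then v else 0) + pvGet0 d t := by
  by_cases h : t = k
  · subst h
    rw [pvGet0_cons', if_pos rfl, if_pos rfl, pvGet0_eq_zero_of_not_mem d t hk, add_zero]
  · rw [pvGet0_cons', if_neg h, if_neg h, zero_add]

-- cumulative sum: sum of lookups over a Nodup index list = sum of values at keys in the list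
lemma pvCummChar (d : List (Int × Int)) (R : List Int) (hR : R.Nodup)
    (hd : (d.map Prod.fst).Nodup) :
    (R.map (pvGet0 d)).sum = ((d.filter (fun p => decide (p.1 ∈ R))).map Prod.snd).sum := by
  induction d with
  | nil =>
    rw [show pvGet0 [] = fun _ => (0 : Int) from funext pvGet0_nil]
    simp
  | cons p d ih =>
    obtain ⟨k, v⟩ := p
    simp only [List.map_cons, List.nodup_cons] at hd
    have hrw : ∀ t ∈ R, pvGet0 ((k, v) :: d) t = (if t = k then v else 0) + pvGet0 d t :=
      fun t _ => pvGet0_cons k v t d hd.1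
    rw [List.map_congr_left hrw, List.sum_map_add, pvSumIndicator R hR k v, ih hd.2]
    by_cases hk : k ∈ R <;> simp [hk]

-- dropping zero terms: restrict a sum to the indices where the summand may be nonzero
lemma pvSumFilter (R : List Int) (f : Int → Int) (p : Int → Bool)
    (h : ∀ t ∈ R, p t = false → f t = 0) :
    (R.map f).sum = ((R.filter p).map f).sum := by
  induction R with
  | nil => simp
  | cons x R ih =>
    have ih' := ih (fun t ht => h t (List.mem_cons_of_mem x ht))
    by_cases hx : p x = true
    · simp [List.filter_cons, hx, ih']
    · have : f x = 0 := h x (List.mem_cons_self) (by simpa using hx)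
      simp [List.filter_cons, hx, ih', this]

-- cumulative components agree
lemma pvCummEq (d : List (Int × Int)) (e : Int) (hd : (d.map Prod.fst).Nodup) :
    ((PySem.List.pyRange 0 (e + 1) 1).map (pvGet0 d)).sum = pvCumm e d := by
  rw [pvCummChar d _ (PySem.List.nodup_pyRange_one 0 (e + 1)) hd]
  unfold pvCumm
  congr 1
  congr 1
  apply List.filter_congr
  intro p _
  have hiff : (p.1 ∈ PySem.List.pyRange 0 (e + 1) 1) ↔ (0 ≤ p.1 ∧ p.1 ≤ e) := by
    rw [PySem.List.mem_pyRange_one]; omega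
  simp [pvWindow, hiff]

-- total component: the range sum equals the sum over the set of present keys
lemma pvTotalEq (d1 d2 d3 : List (Int × Int)) (e : Int) :
    ((PySem.List.pyRange 0 (e + 1) 1).map (pvM3 d1 d2 d3)).sum
      = ((PySem.Set.update
            (PySem.Set.update
              (PySem.Set.update PySem.Set.empty ((d1.map Prod.fst).filter (pvWindow e)))
              ((d2.map Prod.fst).filter (pvWindow e)))
            ((d3.map Prod.fst).filter (pvWindow e))).map
          (fun k => max (max (pvGet0 d1 k) (pvGet0 d2 k)) (pvGet0 d3 k))).sum := by
  have hzero : ∀ t ∈ PySem.List.pyRange 0 (e + 1) 1,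
      (decide (t ∈ d1.map Prod.fst ∨ t ∈ d2.map Prod.fst ∨ t ∈ d3.map Prod.fst)) = false →
      pvM3 d1 d2 d3 t = 0 := by
    intro t _ hf
    simp only [decide_eq_false_iff_not, not_or] at hf
    simp [pvM3, pvGet0_eq_zero_of_not_mem _ _ hf.1, pvGet0_eq_zero_of_not_mem _ _ hf.2.1,
      pvGet0_eq_zero_of_not_mem _ _ hf.2.2]
  rw [pvSumFilter _ _ _ hzero]
  have hperm : List.Perm
      ((PySem.List.pyRange 0 (e + 1) 1).filter
        (fun t => decide (t ∈ d1.map Prod.fst ∨ t ∈ d2.map Prod.fst ∨ t ∈ d3.map Prod.fst)))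
      (PySem.Set.update
          (PySem.Set.update
            (PySem.Set.update PySem.Set.empty ((d1.map Prod.fst).filter (pvWindow e)))
            ((d2.map Prod.fst).filter (pvWindow e)))
          ((d3.map Prod.fst).filter (pvWindow e))) := by
    rw [List.perm_ext_iff_of_nodup]
    · intro t
      have hiff : (t ∈ PySem.List.pyRange 0 (e + 1) 1) ↔ (0 ≤ t ∧ t ≤ e) := by
        rw [PySem.List.mem_pyRange_one]; omega
      simp only [List.mem_filter, PySem.Set.mem_update, PySem.Set.empty, List.not_mem_nil,
        decide_eq_true_eq, hiff, pvWindow, false_or]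
      tauto
    · exact (PySem.List.nodup_pyRange_one 0 (e + 1)).filter _
    · exact PySem.Set.nodup_update _ _
        (PySem.Set.nodup_update _ _ (PySem.Set.nodup_update _ _ List.nodup_nil))
  exact (hperm.map _).sum_eq

-- ===== VERDICT (by name: the statement is the Claim_ definition above) =====
theorem get_global_cycles_three_layer_spec : Claim_equal_get_global_cycles_three_layer := by
  intro d1 d2 d3 e _ hpre
  obtain ⟨h1, h2, h3⟩ := hpre
  show _ = _
  unfold get_global_cycles_three_layer get_global_cycles_three_layer_alt
  rw [pvFoldA]
  dsimp only
  rw [zero_add, zero_add, zero_add, zero_add,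
    pvCummEq d1 e h1, pvCummEq d2 e h2, pvCummEq d3 e h3, pvTotalEq d1 d2 d3 e]
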